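-- pv_equiv track=rewrite | github.com/Guerrilla-Interactive/nm-i-ai-2026 | astar-island/train_predictor_v4.py | is_coastal
-- ===== SOURCE A (Python) =====
-- GRID_SIZE = 40
--
-- def is_coastal(grid, y, x):
--     for dy in [-1, 0, 1]:
--         for dx in [-1, 0, 1]:
--             if dy == 0 and dx == 0: continue
--             ny, nx = y + dy, x + dx
--             if ny < 0 or ny >= GRID_SIZE or nx < 0 or nx >= GRID_SIZE:
--                 return True
--             if grid[ny][nx] == 10: return True
--     return False
-- ===== SOURCE B (Python) =====
-- GRID_SIZE = 40
--
-- def is_coastal(grid, y, x):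
--     # Some neighbor is off the 40x40 grid.
--     if y <= 0 or y >= GRID_SIZE - 1 or x <= 0 or x >= GRID_SIZE - 1:
--         return True
--     # Interior: count water cells in the 3x3 block around (y,x), discount the center.
--     water = sum(row[x-1:x+2].count(10) for row in grid[y-1:y+2])
--     if grid[y][x] == 10:
--         water -= 1
--     return water > 0
-- ===== Notes on version B (the rewrite author's own statement) =====
-- stated objective: alternative
-- what changed: A's single interleaved per-neighbor edge-or-water scan is replaced by a closed-form border test plus slicing out the 3x3 block and counting the 10s in it (discounting the center), with no neighbor-offset loop at all.
-- outside the precondition, e.g. on is_coastal([[0, 10, 10, 10, 0], [], [10], [0, 10, 0, 0]], 4, 2): A returns True, B raises IndexError; on is_coastal([[10, 0], [0, 0]], 1, 1): A returns True, B returns True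
import Mathlib
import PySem

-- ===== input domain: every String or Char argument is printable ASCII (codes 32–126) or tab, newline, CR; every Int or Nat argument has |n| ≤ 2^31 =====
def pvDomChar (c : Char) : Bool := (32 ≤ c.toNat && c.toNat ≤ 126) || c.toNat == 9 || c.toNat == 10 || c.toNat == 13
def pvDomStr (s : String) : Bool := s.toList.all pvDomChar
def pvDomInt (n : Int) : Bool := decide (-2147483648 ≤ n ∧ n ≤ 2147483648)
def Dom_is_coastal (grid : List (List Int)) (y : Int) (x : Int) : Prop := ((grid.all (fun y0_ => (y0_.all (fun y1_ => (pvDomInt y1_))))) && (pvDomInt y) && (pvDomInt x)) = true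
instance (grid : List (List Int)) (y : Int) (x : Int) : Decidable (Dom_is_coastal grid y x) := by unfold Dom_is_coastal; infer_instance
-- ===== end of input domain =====

-- ===== PORT A =====
-- One line: A scans the 8 neighbors, returning True at the first off-grid or water (==10) one.
-- Out-of-grid reads use pyGetD (default 0); Pre_ keeps every read A performs in range.
def pvPairs : List (Int × Int) :=
  [(-1,-1),(-1,0),(-1,1),(0,-1),(0,0),(0,1),(1,-1),(1,0),(1,1)]

def pvCheckA (grid : List (List Int)) (y : Int) (x : Int) (dy : Int) (dx : Int) : Option Bool :=
  if dy = 0 ∧ dx = 0 then none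
  else
    if y + dy < 0 ∨ 40 ≤ y + dy ∨ x + dx < 0 ∨ 40 ≤ x + dx then some true
    else if PySem.List.pyGetD (PySem.List.pyGetD grid (y + dy) []) (x + dx) 0 == 10 then some true
    else none

def is_coastal (grid : List (List Int)) (y : Int) (x : Int) : Bool :=
  match pvPairs.findSome? (fun p => pvCheckA grid y x p.1 p.2) with
  | some b => b
  | none => false

-- ===== PORT B =====
-- B: closed-form border test; otherwise slice the 3x3 block out of the grid, count its 10s,
-- discount the center cell, and compare the count with 0 (no neighbor-offset loop).
def is_coastal_alt (grid : List (List Int)) (y : Int) (x : Int) : Bool :=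
  if y ≤ 0 ∨ 39 ≤ y ∨ x ≤ 0 ∨ 39 ≤ x then true
  else
    let water : Int :=
      (((PySem.List.slice grid (some (y - 1)) (some (y + 2))).map
          (fun row => ((PySem.List.slice row (some (x - 1)) (some (x + 2))).count 10 : Int))).sum)
    let water2 : Int :=
      if PySem.List.pyGetD (PySem.List.pyGetD grid y []) x 0 = 10 then water - 1 else water
    decide (0 < water2)

-- ===== PRECONDITION & SPEC =====
-- Pre_ excludes inputs where A's neighbor indexing reaches a missing row/column (IndexError); it is
-- slightly conservative: it also excludes inputs where A returns True early (a water neighbor, or an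
-- out-of-range neighbor met mid-loop) before ever touching the missing cell.
def Pre_is_coastal (grid : List (List Int)) (y : Int) (x : Int) : Prop :=
  (y ≤ 0 ∨ x ≤ 0 ∨ 41 ≤ y ∨ 41 ≤ x) ∨
  (∀ j ∈ [y - 1, y, y + 1], 0 ≤ j → j < 40 →
    j < (grid.length : Int) ∧
    ∀ i ∈ [x - 1, x, x + 1], 0 ≤ i → i < 40 → i < ((grid.getD j.toNat []).length : Int))
instance (grid : List (List Int)) (y : Int) (x : Int) : Decidable (Pre_is_coastal grid y x) := by unfold Pre_is_coastal; infer_instance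

def pvWitness_is_coastal : List (List Int) × Int × Int := ([[0]], 0, 0)

def Spec_is_coastal (grid : List (List Int)) (y : Int) (x : Int) (out : Bool) : Prop := out = is_coastal_alt grid y x
instance (grid : List (List Int)) (y : Int) (x : Int) (out : Bool) : Decidable (Spec_is_coastal grid y x out) := by unfold Spec_is_coastal; infer_instance

-- ===== CLAIM (what is proved, stated in full; the proofs are below) =====
def Claim_equal_is_coastal : Prop := ∀ (grid : List (List Int)) (y : Int) (x : Int), Dom_is_coastal grid y x → Pre_is_coastal grid y x → Spec_is_coastal grid y x (is_coastal grid y x)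

-- ===== LEMMAS AND PROOFS =====

lemma pvFindSome?_eq_any {α : Type} (l : List α) (f : α → Option Bool)
    (h : ∀ a ∈ l, f a ≠ some false) :
    (match l.findSome? f with | some b => b | none => false) = l.any (fun a => (f a).isSome) := by
  induction l with
  | nil => rfl
  | cons a t ih =>
    simp only [List.findSome?, List.any_cons]
    cases hfa : f a with
    | none => simpa using ih (fun b hb => h b (List.mem_cons_of_mem a hb))
    | some b =>
      cases b with
      | false => exact absurd hfa (h a List.mem_cons_self)
      | true => simp

lemma pvCheckA_ne_some_false (grid : List (List Int)) (y x dy dx : Int) :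
    pvCheckA grid y x dy dx ≠ some false := by
  unfold pvCheckA; split_ifs <;> simp

lemma pvA_eq_any (grid : List (List Int)) (y x : Int) :
    is_coastal grid y x = pvPairs.any (fun p => (pvCheckA grid y x p.1 p.2).isSome) := by
  unfold is_coastal
  exact pvFindSome?_eq_any _ _ (fun p _ => pvCheckA_ne_some_false grid y x p.1 p.2)

lemma pvCheckA_isSome_oob (grid : List (List Int)) (y x dy dx : Int)
    (hne : ¬ (dy = 0 ∧ dx = 0))
    (hoob : y + dy < 0 ∨ 40 ≤ y + dy ∨ x + dx < 0 ∨ 40 ≤ x + dx) :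
    (pvCheckA grid y x dy dx).isSome = true := by
  unfold pvCheckA
  rw [if_neg hne, if_pos hoob]; rfl

lemma pvCheckA_isSome_in (grid : List (List Int)) (y x dy dx : Int)
    (hne : ¬ (dy = 0 ∧ dx = 0))
    (hoob : ¬ (y + dy < 0 ∨ 40 ≤ y + dy ∨ x + dx < 0 ∨ 40 ≤ x + dx)) :
    (pvCheckA grid y x dy dx).isSome
      = (PySem.List.pyGetD (PySem.List.pyGetD grid (y + dy) []) (x + dx) 0 == 10) := by
  unfold pvCheckA
  rw [if_neg hne, if_neg hoob]
  by_cases hw : PySem.List.pyGetD (PySem.List.pyGetD grid (y + dy) []) (x + dx) 0 == 10 <;> simp [hw]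

-- three consecutive elements of a list as a take-of-drop
lemma pvTake3Drop {α : Type} (l : List α) (n : Nat) (h : n + 2 < l.length) :
    (l.drop n).take 3 = [l[n], l[n+1], l[n+2]] := by
  rw [List.drop_eq_getElem_cons (by omega : n < l.length),
      List.drop_eq_getElem_cons (by omega : n + 1 < l.length),
      List.drop_eq_getElem_cons h]
  rfl

-- a length-3 slice with in-range integer bounds
lemma pvSlice3 {α : Type} (l : List α) (c : Int) (h0 : 0 < c)
    (hlen : c + 1 < (l.length : Int)) :
    PySem.List.slice l (some (c - 1)) (some (c + 2))
      = [l[(c-1).toNat], l[(c-1).toNat + 1], l[(c-1).toNat + 2]] := by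
  rw [PySem.List.slice_toNat l (by omega) (by omega)]
  have h3 : (c + 2).toNat - (c - 1).toNat = 3 := by omega
  rw [h3]
  exact pvTake3Drop l _ (by omega)

-- in-range pyGetD is getElem
lemma pvPyGetD_getElem {α : Type} (l : List α) (i : Int) (d : α)
    (h0 : 0 ≤ i) (h : i.toNat < l.length) :
    PySem.List.pyGetD l i d = l[i.toNat] := by
  rw [PySem.List.pyGetD_of_nonneg l d h0, List.getD_eq_getElem l d h]

-- the arithmetic heart: 8-neighbor water disjunction vs 3x3 count minus center
set_option maxHeartbeats 2000000 in
lemma pvKey (a b c d cen e f g h : Int) :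
    ((a == 10) || ((b == 10) || ((c == 10) || ((d == 10) ||
     (false || ((e == 10) || ((f == 10) || ((g == 10) || ((h == 10) || false)))))))))
    = decide (0 < (if cen = 10
        then (([a,b,c].count 10 : Int) + (([d,cen,e].count 10 : Int) + (([f,g,h].count 10 : Int) + 0))) - 1
        else (([a,b,c].count 10 : Int) + (([d,cen,e].count 10 : Int) + (([f,g,h].count 10 : Int) + 0))))) := by
  simp only [List.count_cons, List.count_nil, beq_iff_eq]
  push_cast
  split_ifs <;> simp_all

-- ===== VERDICT (by name: the statement is the Claim_ definition above) =====
theorem is_coastal_spec : Claim_equal_is_coastal := by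
  intro grid y x _ hpre
  unfold Spec_is_coastal
  rw [pvA_eq_any]
  unfold is_coastal_alt
  by_cases hb : y ≤ 0 ∨ 39 ≤ y ∨ x ≤ 0 ∨ 39 ≤ x
  · rw [if_pos hb]
    refine List.any_eq_true.mpr ?_
    rcases hb with h | h | h | h
    · exact ⟨(-1, -1), by simp [pvPairs], pvCheckA_isSome_oob _ _ _ _ _ (by simp) (by omega)⟩
    · exact ⟨(1, -1), by simp [pvPairs], pvCheckA_isSome_oob _ _ _ _ _ (by simp) (by omega)⟩
    · exact ⟨(-1, -1), by simp [pvPairs], pvCheckA_isSome_oob _ _ _ _ _ (by simp) (by omega)⟩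
    · exact ⟨(-1, 1), by simp [pvPairs], pvCheckA_isSome_oob _ _ _ _ _ (by simp) (by omega)⟩
  · rw [if_neg hb]
    push Not at hb
    obtain ⟨h1, h2, h3, h4⟩ := hb
    -- Pre_'s first disjunct is false here, so the in-range facts apply
    have hin := hpre.resolve_left (by omega)
    have hgl : y + 1 < (grid.length : Int) :=
      (hin (y + 1) (by simp) (by omega) (by omega)).1
    have hlen3 : ∀ (j : Int), (j = y - 1 ∨ j = y ∨ j = y + 1) → j.toNat < grid.length := by
      intro j hj
      have hm : j ∈ [y - 1, y, y + 1] := by rcases hj with rfl | rfl | rfl <;> simp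
      have := (hin j hm (by omega) (by omega)).1
      omega
    have hwid3 : ∀ (j : Int) (hj : j = y - 1 ∨ j = y ∨ j = y + 1),
        x + 1 < ((grid[j.toNat]'(hlen3 j hj)).length : Int) := by
      intro j hj
      have hm : j ∈ [y - 1, y, y + 1] := by rcases hj with rfl | rfl | rfl <;> simp
      have h := (hin j hm (by omega) (by omega)).2 (x + 1) (by simp) (by omega) (by omega)
      rwa [List.getD_eq_getElem _ _ (hlen3 j hj)] at h
    have hcell : ∀ (dy dx : Int) (hdy : y + dy = y - 1 ∨ y + dy = y ∨ y + dy = y + 1)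
        (hdx1 : -1 ≤ dx) (hdx2 : dx ≤ 1),
        PySem.List.pyGetD (PySem.List.pyGetD grid (y + dy) []) (x + dx) 0
          = (grid[(y + dy).toNat]'(hlen3 (y + dy) hdy))[(x + dx).toNat]'(by
              have := hwid3 (y + dy) hdy; omega) := by
      intro dy dx hdy hdx1 hdx2
      rw [pvPyGetD_getElem grid (y + dy) [] (by omega) (hlen3 (y + dy) hdy)]
      exact pvPyGetD_getElem _ (x + dx) 0 (by omega)
        (by have := hwid3 (y + dy) hdy; omega)
    -- expand the row slice and the three column slices
    have hslice := pvSlice3 grid y (by omega) hgl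
    have hs0 := pvSlice3 (grid[(y - 1).toNat]'(hlen3 (y - 1) (Or.inl rfl))) x (by omega)
      (hwid3 (y - 1) (Or.inl rfl))
    have hs1 := pvSlice3 (grid[y.toNat]'(hlen3 y (Or.inr (Or.inl rfl)))) x (by omega)
      (hwid3 y (Or.inr (Or.inl rfl)))
    have hs2 := pvSlice3 (grid[(y + 1).toNat]'(hlen3 (y + 1) (Or.inr (Or.inr rfl)))) x (by omega)
      (hwid3 (y + 1) (Or.inr (Or.inr rfl)))
    have e3' : (y + 1).toNat = (y - 1).toNat + 2 := by omega
    have e7' : y.toNat = (y - 1).toNat + 1 := by omega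
    simp only [e7'] at hs1
    simp only [e3'] at hs2
    -- reduce A's scan to the 8 boolean tests
    simp only [pvPairs, List.any_cons, List.any_nil]
    have hz : (pvCheckA grid y x 0 0).isSome = false := by
      unfold pvCheckA; rw [if_pos ⟨rfl, rfl⟩]; rfl
    rw [hz]
    rw [pvCheckA_isSome_in _ _ _ _ _ (by simp) (by omega),
        pvCheckA_isSome_in _ _ _ _ _ (by simp) (by omega),
        pvCheckA_isSome_in _ _ _ _ _ (by simp) (by omega),
        pvCheckA_isSome_in _ _ _ _ _ (by simp) (by omega),
        pvCheckA_isSome_in _ _ _ _ _ (by simp) (by omega),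
        pvCheckA_isSome_in _ _ _ _ _ (by simp) (by omega),
        pvCheckA_isSome_in _ _ _ _ _ (by simp) (by omega),
        pvCheckA_isSome_in _ _ _ _ _ (by simp) (by omega)]
    -- reduce B to the 3x3 counts
    rw [hslice]
    simp only [List.map_cons, List.map_nil, List.sum_cons, List.sum_nil]
    rw [hs0, hs1, hs2]
    -- rewrite all cell reads as getElem reads
    rw [hcell (-1) (-1) (by omega) (by omega) (by omega),
        hcell (-1) 0 (by omega) (by omega) (by omega),
        hcell (-1) 1 (by omega) (by omega) (by omega),
        hcell 0 (-1) (by omega) (by omega) (by omega),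
        hcell 0 1 (by omega) (by omega) (by omega),
        hcell 1 (-1) (by omega) (by omega) (by omega),
        hcell 1 0 (by omega) (by omega) (by omega),
        hcell 1 1 (by omega) (by omega) (by omega)]
    have hcen : PySem.List.pyGetD (PySem.List.pyGetD grid y []) x 0
        = (grid[y.toNat]'(hlen3 y (Or.inr (Or.inl rfl))))[x.toNat]'(by
            have := hwid3 y (Or.inr (Or.inl rfl)); omega) := by
      have h := hcell 0 0 (by omega) (by omega) (by omega)
      simpa using h
    rw [hcen]
    -- align the index arithmetic on a common base (n, m)
    have e1 : (y + -1).toNat = (y - 1).toNat := by omega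
    have e2 : (y + 0).toNat = (y - 1).toNat + 1 := by omega
    have e3 : (y + 1).toNat = (y - 1).toNat + 2 := by omega
    have e4 : (x + -1).toNat = (x - 1).toNat := by omega
    have e5 : (x + 0).toNat = (x - 1).toNat + 1 := by omega
    have e6 : (x + 1).toNat = (x - 1).toNat + 2 := by omega
    have e7 : y.toNat = (y - 1).toNat + 1 := by omega
    have e8 : x.toNat = (x - 1).toNat + 1 := by omega
    simp only [e1, e2, e3, e4, e5, e6, e7, e8]
    exact pvKey _ _ _ _ _ _ _ _ _
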